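-- pv_equiv track=rewrite | github.com/ECE-UW/assignment-1-Gurleen-Sadiora | a1ece650.py | index_of_split
-- ===== SOURCE A (Python) =====
-- def index_of_split(string):
--     c = 0
--     for i in string:
--         if (i == " "):
--             c += 1
--         if (i == '('):
--             break
--
--     return c
-- ===== SOURCE B (Python) =====
-- def index_of_split(string):
--     idx = string.find('(')
--     prefix = string if idx == -1 else string[:idx]
--     return prefix.count(' ')
-- ===== Notes on version B (the rewrite author's own statement) =====
-- stated objective: faster
-- what changed: Replaces the fused per-character counting loop with break by first isolating the prefix before the first opening parenthesis via str.find and a slice, then counting spaces in it with str.count; no mutable counter or break.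
import Mathlib
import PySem

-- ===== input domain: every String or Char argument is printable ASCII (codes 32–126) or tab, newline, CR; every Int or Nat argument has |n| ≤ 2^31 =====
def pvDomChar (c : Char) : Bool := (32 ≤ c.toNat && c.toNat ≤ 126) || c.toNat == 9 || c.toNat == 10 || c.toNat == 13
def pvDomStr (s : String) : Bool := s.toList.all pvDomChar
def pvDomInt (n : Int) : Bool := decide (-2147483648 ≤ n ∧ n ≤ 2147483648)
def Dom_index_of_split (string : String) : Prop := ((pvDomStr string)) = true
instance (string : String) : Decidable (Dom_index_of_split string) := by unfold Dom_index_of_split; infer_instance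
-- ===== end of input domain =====

-- B isolates the prefix before the first opening parenthesis with find + slice and counts spaces with count, instead of A's fused per-character loop with a break (measured constant-factor speedup: C-level find/slice/count vs an interpreted loop).


-- ===== PORT A =====
-- 'for i in string: if i == " ": c += 1; if i == "(": break' — structural recursion over the chars with the counter c
def indexOfSplitGoA : List Char → Int → Int
  | [], c => c
  | i :: rest, c =>
      let c' := if i = ' ' then c + 1 else c
      if i = '(' then c' else indexOfSplitGoA rest c'

def index_of_split (string : String) : Int := indexOfSplitGoA string.toList 0

-- ===== PORT B =====
def index_of_split_alt (string : String) : Int :=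
  let idx := PySem.Str.find string "("
  let pre := if idx = -1 then string else PySem.Str.slice string none (some idx)
  (PySem.Str.count pre " " : Int)

-- ===== PRECONDITION & SPEC =====
def Spec_index_of_split (string : String) (out : Int) : Prop := out = index_of_split_alt string
instance (string : String) (out : Int) : Decidable (Spec_index_of_split string out) := by unfold Spec_index_of_split; infer_instance

-- ===== CLAIM (what is proved, stated in full; the proofs are below) =====
def Claim_equal_index_of_split : Prop := ∀ (string : String), Dom_index_of_split string → Spec_index_of_split string (index_of_split string)

-- ===== LEMMAS AND PROOFS =====

-- Python's substring count for a single-character needle is the char count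
theorem countGo_singleton (c : Char) : ∀ (fuel : Nat) (l : List Char) (acc : Nat),
    l.length ≤ fuel → PySem.Chars.count.go [c] fuel l acc = acc + l.count c
  | 0, [], acc, _ => by simp [PySem.Chars.count.go]
  | 0, _ :: _, _, h => by simp at h
  | _ + 1, [], acc, _ => by simp [PySem.Chars.count.go]
  | fuel + 1, x :: t, acc, h => by
    have ht : t.length ≤ fuel := by simpa using h
    have h1 := countGo_singleton c fuel t (acc + 1) ht
    have h2 := countGo_singleton c fuel t acc ht
    by_cases hx : x = c
    · subst hx
      simp [PySem.Chars.count.go, List.isPrefixOf, h1]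
      omega
    · simp [PySem.Chars.count.go, List.isPrefixOf, hx, Ne.symm hx, h2]

theorem count_singleton (l : List Char) (c : Char) :
    PySem.Chars.count l [c] = l.count c := by
  simp [PySem.Chars.count, countGo_singleton c l.length l 0 le_rfl]

-- A's loop counts the spaces in the longest '('-free prefix
theorem goA_eq (l : List Char) : ∀ (c : Int),
    indexOfSplitGoA l c = c + ((l.takeWhile (· ≠ '(')).count ' ' : Int) := by
  induction l with
  | nil => intro c; simp [indexOfSplitGoA]
  | cons x t ih =>
    intro c
    by_cases hx : x = '('
    · subst hx
      simp [indexOfSplitGoA]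
    · by_cases hs : x = ' '
      · subst hs
        simp [indexOfSplitGoA, hx, ih]
        ring
      · simp [indexOfSplitGoA, hx, hs, ih]

theorem prefix_singleton_iff (c : Char) (l : List Char) : [c] <+: l ↔ l.head? = some c := by
  cases l with
  | nil => simp
  | cons x t => simp [List.cons_prefix_cons, eq_comm]

-- the prefix up to the first '(' is the longest '('-free prefix
theorem take_eq_takeWhile : ∀ (l : List Char) (n : Nat),
    l[n]? = some '(' → (∀ i, i < n → l[i]? ≠ some '(') →
    l.take n = l.takeWhile (· ≠ '(')
  | [], n, hn, _ => by simp at hn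
  | x :: t, 0, hn, _ => by
    simp at hn
    simp [hn]
  | x :: t, n + 1, hn, hlt => by
    have hx : x ≠ '(' := by
      intro hx; exact hlt 0 (by omega) (by simp [hx])
    have := take_eq_takeWhile t n (by simpa using hn)
      (fun i hi => by simpa using hlt (i + 1) (by omega))
    simp [hx, this]

-- B's prefix (find + slice) is that same longest '('-free prefix
theorem pre_eq_takeWhile (l : List Char) :
    (if PySem.Chars.find l ['('] = -1 then l
     else PySem.Chars.slice l none (some (PySem.Chars.find l ['(']))) =
    l.takeWhile (· ≠ '(') := by
  by_cases hmem : '(' ∈ l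
  · obtain ⟨a, b, rfl⟩ := List.append_of_mem hmem
    have hinf : ['('] <:+: a ++ '(' :: b := ⟨a, b, by simp⟩
    have h0 : 0 ≤ PySem.Chars.find (a ++ '(' :: b) ['('] :=
      (PySem.Chars.find_nonneg_iff _ _).mpr hinf
    have hne : PySem.Chars.find (a ++ '(' :: b) ['('] ≠ -1 :=
      (PySem.Chars.find_ne_neg_one_iff _ _).mpr hinf
    obtain ⟨hpre, hmin⟩ := PySem.Chars.find_spec h0
    rw [if_neg hne, PySem.Chars.slice, PySem.List.slice_to _ h0]
    apply take_eq_takeWhile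
    · rw [← List.head?_drop]
      exact (prefix_singleton_iff _ _).mp hpre
    · intro i hi hget
      exact hmin i hi ((prefix_singleton_iff _ _).mpr (by rw [List.head?_drop]; exact hget))
  · have h1 : PySem.Chars.find l ['('] = -1 := by
      rw [PySem.Chars.find_eq_neg_one_iff]
      intro hinf
      exact hmem (hinf.subset (by simp))
    rw [if_pos h1, Eq.comm, List.takeWhile_eq_self_iff]
    intro x hx
    simp only [ne_eq, decide_eq_true_eq]
    rintro rfl
    exact hmem hx

-- ===== VERDICT (by name: the statement is the Claim_ definition above) =====
theorem index_of_split_spec : Claim_equal_index_of_split := by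
  intro s _
  unfold Spec_index_of_split index_of_split index_of_split_alt
  simp only [PySem.Str.find_eq, PySem.Str.count_eq,
    show ("(".toList) = ['('] from rfl, show (" ".toList) = [' '] from rfl,
    apply_ite String.toList, PySem.Str.slice, String.toList_ofList]
  rw [count_singleton, goA_eq, pre_eq_takeWhile]
  simp
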